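-- pv_equiv track=rewrite | github.com/benquick123/code-profiling | code/batch-1/vse-naloge-brez-testov/DN7-M-99.py | varna_pot
-- ===== SOURCE A (Python) =====
-- def varen_premik(x0, y0, x1, y1, mine):
--
--
--     if x0 == x1:
--         if y1 < y0:
--             y0, y1 = y1, y0
--         for i in range(y0, y1 + 1):
--                 if (x0, i) in mine:
--                     return False
--     else:
--         if x1 < x0:
--             x0, x1 = x1, x0
--         for i in range(x0, x1 + 1):
--             if (i, y0) in mine:
--                 return False
--
--     return True
--
-- def varna_pot(pot, mine):
--
--     if len(pot) > 0:
--         x0, y0 = pot[0]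
--
--         if (x0, y0) in mine:
--             return False
--
--         for (x0, y0), (x1, y1) in zip(pot,pot[1:]):
--             if varen_premik(x0, y0, x1, y1, mine) == False:
--                 return False
--
--     return True
-- ===== SOURCE B (Python) =====
-- def varna_pot(pot, mine):
--     # Iterate over the mines; test each mine against the start cell and each
--     # consecutive segment with interval arithmetic instead of scanning a range.
--     if not pot:
--         return True
--     start = pot[0]
--     segs = list(zip(pot, pot[1:]))
--     for m in mine:
--         if m == start:
--             return False
--         mx, my = m
--         for (x0, y0), (x1, y1) in segs:
--             if x0 == x1:
--                 if mx == x0 and min(y0, y1) <= my <= max(y0, y1):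
--                     return False
--             elif my == y0 and min(x0, x1) <= mx <= max(x0, x1):
--                 return False
--     return True
-- ===== Notes on version B (the rewrite author's own statement) =====
-- stated objective: alternative
-- what changed: B loops over the mines and tests each against the start cell and each segment with min/max interval comparisons, instead of A's scan of every integer coordinate along each segment with a membership test per cell; B's cost is independent of segment length.
import Mathlib
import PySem

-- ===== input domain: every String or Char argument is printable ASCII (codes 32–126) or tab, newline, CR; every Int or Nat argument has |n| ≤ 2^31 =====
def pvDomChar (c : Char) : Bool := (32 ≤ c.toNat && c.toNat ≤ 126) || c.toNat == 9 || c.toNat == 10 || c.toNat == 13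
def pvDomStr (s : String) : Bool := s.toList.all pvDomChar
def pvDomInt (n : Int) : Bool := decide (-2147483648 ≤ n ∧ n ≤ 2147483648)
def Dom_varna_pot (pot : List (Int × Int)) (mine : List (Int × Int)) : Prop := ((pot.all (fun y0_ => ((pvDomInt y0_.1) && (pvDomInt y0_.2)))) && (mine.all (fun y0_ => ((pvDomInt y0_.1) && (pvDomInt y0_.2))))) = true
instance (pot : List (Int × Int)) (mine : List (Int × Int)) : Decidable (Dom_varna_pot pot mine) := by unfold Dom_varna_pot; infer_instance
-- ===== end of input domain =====

-- B iterates over the mines and replaces A's per-cell range scan of each segment by min/max interval comparisons (cost independent of segment length).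


-- ===== PORT A =====
def varen_premik (x0 y0 x1 y1 : Int) (mine : List (Int × Int)) : Bool :=
  if x0 == x1 then
    let p := if y1 < y0 then (y1, y0) else (y0, y1)
    -- 'for i in range(y0, y1+1): if (x0,i) in mine: return False' / 'return True'
    (PySem.List.pyRange p.1 (p.2 + 1) 1).all (fun i => !(mine.contains (x0, i)))
  else
    let p := if x1 < x0 then (x1, x0) else (x0, x1)
    (PySem.List.pyRange p.1 (p.2 + 1) 1).all (fun i => !(mine.contains (i, y0)))

def varna_pot (pot : List (Int × Int)) (mine : List (Int × Int)) : Bool :=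
  match pot with
  | [] => true
  | (x0, y0) :: _ =>
    if mine.contains (x0, y0) then false
    else (pot.zip pot.tail).all (fun s => varen_premik s.1.1 s.1.2 s.2.1 s.2.2 mine)

-- ===== PORT B =====
def segHit (m p0 p1 : Int × Int) : Bool :=
  if p0.1 == p1.1 then
    m.1 == p0.1 && decide (min p0.2 p1.2 ≤ m.2) && decide (m.2 ≤ max p0.2 p1.2)
  else
    m.2 == p0.2 && decide (min p0.1 p1.1 ≤ m.1) && decide (m.1 ≤ max p0.1 p1.1)

def varna_pot_alt (pot : List (Int × Int)) (mine : List (Int × Int)) : Bool :=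
  match pot with
  | [] => true
  | start :: _ =>
    !(mine.any (fun m =>
        m == start || (pot.zip pot.tail).any (fun s => segHit m s.1 s.2)))

-- ===== PRECONDITION & SPEC =====
def Spec_varna_pot (pot : List (Int × Int)) (mine : List (Int × Int)) (out : Bool) : Prop := out = varna_pot_alt pot mine
instance (pot : List (Int × Int)) (mine : List (Int × Int)) (out : Bool) : Decidable (Spec_varna_pot pot mine out) := by unfold Spec_varna_pot; infer_instance

-- ===== CLAIM (what is proved, stated in full; the proofs are below) =====
def Claim_equal_varna_pot : Prop := ∀ (pot : List (Int × Int)) (mine : List (Int × Int)), Dom_varna_pot pot mine → Spec_varna_pot pot mine (varna_pot pot mine)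

-- ===== LEMMAS AND PROOFS =====

-- A per-cell scan along a column equals "no mine in the column interval".
theorem scan_col (x lo hi : Int) (mine : List (Int × Int)) :
    ((PySem.List.pyRange lo (hi + 1) 1).all (fun i => !(mine.contains (x, i)))) =
    !(mine.any (fun m => m.1 == x && decide (lo ≤ m.2) && decide (m.2 ≤ hi))) := by
  rw [Bool.eq_iff_iff]
  simp only [List.all_eq_true, PySem.List.mem_pyRange_one, Bool.not_eq_eq_eq_not,
    Bool.not_true, List.contains_eq_mem, decide_eq_false_iff_not, List.any_eq_false]
  constructor
  · intro h m hm hc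
    simp only [Bool.and_eq_true, decide_eq_true_eq, beq_iff_eq] at hc
    obtain ⟨a, b⟩ := m
    obtain ⟨⟨h1, h2⟩, h3⟩ := hc
    subst h1
    exact h b ⟨h2, by omega⟩ hm
  · intro h i ⟨h1, h2⟩ hmem
    exact h (x, i) hmem (by simp; omega)

-- The same for the row scan.
theorem scan_row (y lo hi : Int) (mine : List (Int × Int)) :
    ((PySem.List.pyRange lo (hi + 1) 1).all (fun i => !(mine.contains (i, y)))) =
    !(mine.any (fun m => m.2 == y && decide (lo ≤ m.1) && decide (m.1 ≤ hi))) := by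
  rw [Bool.eq_iff_iff]
  simp only [List.all_eq_true, PySem.List.mem_pyRange_one, Bool.not_eq_eq_eq_not,
    Bool.not_true, List.contains_eq_mem, decide_eq_false_iff_not, List.any_eq_false]
  constructor
  · intro h m hm hc
    simp only [Bool.and_eq_true, decide_eq_true_eq, beq_iff_eq] at hc
    obtain ⟨a, b⟩ := m
    obtain ⟨⟨h1, h2⟩, h3⟩ := hc
    subst h1
    exact h a ⟨h2, by omega⟩ hm
  · intro h i ⟨h1, h2⟩ hmem
    exact h (i, y) hmem (by simp; omega)

-- A\'s per-cell safety scan of one segment equals "no mine hits the segment".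
theorem varen_premik_eq (x0 y0 x1 y1 : Int) (mine : List (Int × Int)) :
    varen_premik x0 y0 x1 y1 mine = !(mine.any (fun m => segHit m (x0, y0) (x1, y1))) := by
  unfold varen_premik segHit
  by_cases hx : x0 = x1
  · simp only [hx, beq_self_eq_true, if_true]
    by_cases hy : y1 < y0
    · simp only [if_pos hy, scan_col, min_eq_right hy.le, max_eq_left hy.le]
    · simp only [if_neg hy, scan_col, min_eq_left (by omega : y0 ≤ y1),
        max_eq_right (by omega : y0 ≤ y1)]
  · simp only [beq_iff_eq, hx, if_false]
    by_cases hxs : x1 < x0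
    · simp only [if_pos hxs, scan_row, min_eq_right hxs.le, max_eq_left hxs.le]
    · simp only [if_neg hxs, scan_row, min_eq_left (by omega : x0 ≤ x1),
        max_eq_right (by omega : x0 ≤ x1)]

-- ===== VERDICT (by name: the statement is the Claim_ definition above) =====
theorem varna_pot_spec : Claim_equal_varna_pot := by
  intro pot mine _
  unfold Spec_varna_pot
  cases pot with
  | nil => rfl
  | cons hd tl =>
    obtain ⟨x0, y0⟩ := hd
    simp only [varna_pot, varna_pot_alt]
    rw [Bool.eq_iff_iff]
    by_cases hmem : (x0, y0) ∈ mine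
    · rw [if_pos (by simpa [List.contains_eq_mem] using hmem)]
      rw [List.any_eq_true.mpr ⟨(x0, y0), hmem, by simp⟩]
      simp
    · rw [if_neg (by simpa [List.contains_eq_mem] using hmem)]
      simp only [List.all_eq_true, varen_premik_eq, Bool.not_eq_true', List.any_eq_false,
        Bool.or_eq_true, not_or, beq_iff_eq]
      constructor
      · intro h m hm
        refine ⟨fun he => hmem (he ▸ hm), fun hany => ?_⟩
        obtain ⟨s, hs, hhit⟩ := List.any_eq_true.mp hany
        exact h s hs m hm hhit
      · intro h s hs m hm hhit
        exact (h m hm).2 (List.any_eq_true.mpr ⟨s, hs, hhit⟩)
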